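-- pv_equiv track=rewrite | github.com/yairMoshkovitz/Gmarasmsystem | database.py | int_to_gimatriya
-- ===== SOURCE A (Python) =====
-- def int_to_gimatriya(n):
--     """Convert integer to Hebrew gimatriya string."""
--     if n <= 0: return ""
--     units = ["", "א", "ב", "ג", "ד", "ה", "ו", "ז", "ח", "ט"]
--     tens = ["", "י", "כ", "ל", "מ", "נ", "ס", "ע", "פ", "צ"]
--     hundreds = ["", "ק", "ר", "ש", "ת"]
--
--     if n == 15: return "טו"
--     if n == 16: return "טז"
--
--     res = ""
--     h = n // 100
--     while h > 4:
--         res += "ת"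
--         h -= 4
--     res += hundreds[h]
--
--     rem = n % 100
--     if rem == 15: res += "טו"
--     elif rem == 16: res += "טז"
--     else:
--         res += tens[rem // 10]
--         res += units[rem % 10]
--     return res
-- ===== SOURCE B (Python) =====
-- def int_to_gimatriya(n):
--     """Convert integer to Hebrew gimatriya string (greedy subtractive)."""
--     if n <= 0:
--         return ""
--     res = []
--     while n >= 100:
--         if n >= 400:
--             res.append("\u05ea"); n -= 400
--         elif n >= 300:
--             res.append("\u05e9"); n -= 300
--         elif n >= 200:
--             res.append("\u05e8"); n -= 200
--         else:
--             res.append("\u05e7"); n -= 100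
--     if n == 15:
--         res.append("\u05d8\u05d5")
--     elif n == 16:
--         res.append("\u05d8\u05d6")
--     else:
--         for v, l in ((90, "\u05e6"), (80, "\u05e4"), (70, "\u05e2"), (60, "\u05e1"),
--                      (50, "\u05e0"), (40, "\u05de"), (30, "\u05dc"), (20, "\u05db"),
--                      (10, "\u05d9"), (9, "\u05d8"), (8, "\u05d7"), (7, "\u05d6"),
--                      (6, "\u05d5"), (5, "\u05d4"), (4, "\u05d3"), (3, "\u05d2"),
--                      (2, "\u05d1"), (1, "\u05d0")):
--             if n >= v:
--                 res.append(l); n -= v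
--     return "".join(res)
-- ===== Notes on version B (the rewrite author's own statement) =====
-- stated objective: alternative
-- what changed: A builds the numeral from positional digit tables (hundreds via a while-loop on n//100 plus tens/units array indexing on the remainder); B is a greedy subtractive converter that repeatedly takes the largest fitting value from a descending value/letter table, intercepting the two special tet-combinations only once the remainder is below a hundred.
import Mathlib
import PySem

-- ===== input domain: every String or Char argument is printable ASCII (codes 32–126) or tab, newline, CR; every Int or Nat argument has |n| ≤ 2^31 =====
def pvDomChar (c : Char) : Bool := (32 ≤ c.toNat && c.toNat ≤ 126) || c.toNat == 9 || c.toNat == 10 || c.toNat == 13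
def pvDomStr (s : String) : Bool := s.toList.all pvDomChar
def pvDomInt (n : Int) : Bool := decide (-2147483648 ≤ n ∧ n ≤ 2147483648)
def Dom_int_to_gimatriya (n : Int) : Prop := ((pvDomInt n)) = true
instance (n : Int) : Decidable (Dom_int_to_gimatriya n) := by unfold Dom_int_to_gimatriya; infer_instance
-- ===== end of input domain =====

-- B replaces A's digit-table lookups (h = n//100 loop over hundreds plus tens/units array indexing)
-- by a greedy subtractive walk over a descending value/letter table; objective: alternative (same cost).

-- ===== PORT A =====
def aUnits : List String := ["", "א", "ב", "ג", "ד", "ה", "ו", "ז", "ח", "ט"]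
def aTens : List String := ["", "י", "כ", "ל", "מ", "נ", "ס", "ע", "פ", "צ"]
def aHundreds : List String := ["", "ק", "ר", "ש", "ת"]

-- Python 'while h > 4' loop; fuel = h.toNat is enough (h drops by 4 each pass)
def aHundLoop : Nat → String → Int → String × Int
  | 0, res, h => (res, h)
  | f + 1, res, h => if 4 < h then aHundLoop f (res ++ "ת") (h - 4) else (res, h)

-- indexing aHundreds/aTens/aUnits is always in range here, so the pyGetD default "" is never used
def int_to_gimatriya (n : Int) : String :=
  if n ≤ 0 then ""
  else if n = 15 then "טו"
  else if n = 16 then "טז"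
  else
    let h := PySem.Int.floordiv n 100
    let p := aHundLoop h.toNat "" h
    let res := p.1 ++ PySem.List.pyGetD aHundreds p.2 ""
    let rem := PySem.Int.mod n 100
    if rem = 15 then res ++ "טו"
    else if rem = 16 then res ++ "טז"
    else res ++ PySem.List.pyGetD aTens (PySem.Int.floordiv rem 10) ""
             ++ PySem.List.pyGetD aUnits (PySem.Int.mod rem 10) ""

-- ===== PORT B =====
-- Python 'while n >= 100' greedy hundreds loop; fuel = n.toNat is enough (n drops by ≥ 100)
def bHighLoop : Nat → List String → Int → List String × Int
  | 0, res, m => (res, m)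
  | f + 1, res, m =>
    if 100 ≤ m then
      if 400 ≤ m then bHighLoop f (res ++ ["ת"]) (m - 400)
      else if 300 ≤ m then bHighLoop f (res ++ ["ש"]) (m - 300)
      else if 200 ≤ m then bHighLoop f (res ++ ["ר"]) (m - 200)
      else bHighLoop f (res ++ ["ק"]) (m - 100)
    else (res, m)

def bLowTable : List (Int × String) :=
  [(90, "צ"), (80, "פ"), (70, "ע"), (60, "ס"), (50, "נ"), (40, "מ"), (30, "ל"), (20, "כ"),
   (10, "י"), (9, "ט"), (8, "ח"), (7, "ז"), (6, "ו"), (5, "ה"), (4, "ד"), (3, "ג"), (2, "ב"), (1, "א")]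

def bLowStep (p : List String × Int) (vl : Int × String) : List String × Int :=
  if vl.1 ≤ p.2 then (p.1 ++ [vl.2], p.2 - vl.1) else p

def int_to_gimatriya_alt (n : Int) : String :=
  if n ≤ 0 then ""
  else
    let q := bHighLoop n.toNat [] n
    let parts :=
      if q.2 = 15 then q.1 ++ ["טו"]
      else if q.2 = 16 then q.1 ++ ["טז"]
      else (bLowTable.foldl bLowStep q).1
    String.join parts

-- ===== PRECONDITION & SPEC =====
def Spec_int_to_gimatriya (n : Int) (out : String) : Prop := out = int_to_gimatriya_alt n
instance (n : Int) (out : String) : Decidable (Spec_int_to_gimatriya n out) := by unfold Spec_int_to_gimatriya; infer_instance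

-- ===== CLAIM (what is proved, stated in full; the proofs are below) =====
def Claim_equal_int_to_gimatriya : Prop := ∀ (n : Int), Dom_int_to_gimatriya n → Spec_int_to_gimatriya n (int_to_gimatriya n)

-- ===== LEMMAS AND PROOFS =====

-- the small cases, checked by the kernel
set_option maxRecDepth 4000 in
lemma base_cases : ∀ k ∈ List.range 500, int_to_gimatriya (k : Int) = int_to_gimatriya_alt (k : Int) := by decide

-- A-side loop lemmas
lemma aHundLoop_exit (f : Nat) (res : String) (h : Int) (hh : ¬ 4 < h) :
    aHundLoop f res h = (res, h) := by
  cases f <;> simp [aHundLoop, hh]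

lemma aHundLoop_fuel (f1 : Nat) : ∀ (f2 : Nat) (res : String) (h : Int),
    h.toNat ≤ f1 → h.toNat ≤ f2 → aHundLoop f1 res h = aHundLoop f2 res h := by
  induction f1 with
  | zero =>
    intro f2 res h h1 _
    have hh : ¬ 4 < h := by omega
    rw [aHundLoop_exit _ _ _ hh, aHundLoop_exit _ _ _ hh]
  | succ f ih =>
    intro f2 res h h1 h2
    by_cases hh : 4 < h
    · have hf2 : ∃ g, f2 = g + 1 := by
        refine ⟨f2 - 1, ?_⟩; omega
      obtain ⟨g, rfl⟩ := hf2
      simp only [aHundLoop, hh, if_pos]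
      exact ih g (res ++ "ת") (h - 4) (by omega) (by omega)
    · rw [aHundLoop_exit _ _ _ hh, aHundLoop_exit _ _ _ hh]

lemma aHundLoop_acc (f : Nat) : ∀ (res : String) (h : Int),
    aHundLoop f res h = (res ++ (aHundLoop f "" h).1, (aHundLoop f "" h).2) := by
  induction f with
  | zero => intro res h; simp [aHundLoop]
  | succ f ih =>
    intro res h
    by_cases hh : 4 < h
    · simp only [aHundLoop, hh, if_pos]
      rw [ih (res ++ "ת"), ih ("" ++ "ת")]
      simp [String.append_assoc, String.empty_append]
    · simp [aHundLoop, hh]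

lemma aHundLoop_step (f : Nat) (res : String) (h : Int) (hh : 4 < h) (hf : h.toNat ≤ f) :
    aHundLoop f res h = aHundLoop (h - 4).toNat (res ++ "ת") (h - 4) := by
  have hf' : ∃ g, f = g + 1 := ⟨f - 1, by omega⟩
  obtain ⟨g, rfl⟩ := hf'
  simp only [aHundLoop, hh, if_pos]
  exact aHundLoop_fuel g _ _ _ (by omega) (by omega)

-- B-side loop lemmas
lemma bHighLoop_exit (f : Nat) (res : List String) (m : Int) (hm : ¬ 100 ≤ m) :
    bHighLoop f res m = (res, m) := by
  cases f <;> simp [bHighLoop, hm]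

lemma bHighLoop_fuel (f1 : Nat) : ∀ (f2 : Nat) (res : List String) (m : Int),
    m.toNat ≤ f1 → m.toNat ≤ f2 → bHighLoop f1 res m = bHighLoop f2 res m := by
  induction f1 with
  | zero =>
    intro f2 res m h1 _
    have hm : ¬ 100 ≤ m := by omega
    rw [bHighLoop_exit _ _ _ hm, bHighLoop_exit _ _ _ hm]
  | succ f ih =>
    intro f2 res m h1 h2
    by_cases hm : 100 ≤ m
    · have hf2 : ∃ g, f2 = g + 1 := ⟨f2 - 1, by omega⟩
      obtain ⟨g, rfl⟩ := hf2
      simp only [bHighLoop, hm, if_pos]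
      by_cases h4 : 400 ≤ m
      · simp only [h4, if_pos]; exact ih g _ _ (by omega) (by omega)
      · by_cases h3 : 300 ≤ m
        · simp only [h4, h3, if_pos, if_false]; exact ih g _ _ (by omega) (by omega)
        · by_cases h2' : 200 ≤ m
          · simp only [h4, h3, h2', if_pos, if_false]; exact ih g _ _ (by omega) (by omega)
          · simp only [h4, h3, h2', if_false]; exact ih g _ _ (by omega) (by omega)
    · rw [bHighLoop_exit _ _ _ hm, bHighLoop_exit _ _ _ hm]

lemma bHighLoop_acc (f : Nat) : ∀ (res : List String) (m : Int),
    bHighLoop f res m = (res ++ (bHighLoop f [] m).1, (bHighLoop f [] m).2) := by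
  induction f with
  | zero => intro res m; simp [bHighLoop]
  | succ f ih =>
    intro res m
    by_cases hm : 100 ≤ m
    · simp only [bHighLoop, hm, if_pos]
      by_cases h4 : 400 ≤ m
      · simp only [h4, if_pos]; rw [ih (res ++ ["ת"]), ih ([] ++ ["ת"])]; simp
      · by_cases h3 : 300 ≤ m
        · simp only [h4, h3, if_pos, if_false]; rw [ih (res ++ ["ש"]), ih ([] ++ ["ש"])]; simp
        · by_cases h2' : 200 ≤ m
          · simp only [h4, h3, h2', if_pos, if_false]; rw [ih (res ++ ["ר"]), ih ([] ++ ["ר"])]; simp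
          · simp only [h4, h3, h2', if_false]; rw [ih (res ++ ["ק"]), ih ([] ++ ["ק"])]; simp
    · simp [bHighLoop, hm]

lemma bHighLoop_step400 (f : Nat) (res : List String) (m : Int) (hm : 400 ≤ m) (hf : m.toNat ≤ f) :
    bHighLoop f res m = bHighLoop (m - 400).toNat (res ++ ["ת"]) (m - 400) := by
  have hf' : ∃ g, f = g + 1 := ⟨f - 1, by omega⟩
  obtain ⟨g, rfl⟩ := hf'
  have hm1 : (100 : Int) ≤ m := by omega
  simp only [bHighLoop, hm1, hm, if_pos]
  exact bHighLoop_fuel g _ _ _ (by omega) (by omega)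

-- the low foldl only ever appends to its string accumulator
lemma bLow_acc (tbl : List (Int × String)) : ∀ (r1 r2 : List String) (m : Int),
    tbl.foldl bLowStep (r1 ++ r2, m) = (r1 ++ (tbl.foldl bLowStep (r2, m)).1, (tbl.foldl bLowStep (r2, m)).2) := by
  induction tbl with
  | nil => intro r1 r2 m; simp
  | cons vl tl ih =>
    intro r1 r2 m
    simp only [List.foldl_cons, bLowStep]
    by_cases hv : vl.1 ≤ m
    · simp only [hv, if_pos]
      rw [show (r1 ++ r2) ++ [vl.2] = r1 ++ (r2 ++ [vl.2]) by simp]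
      exact ih r1 (r2 ++ [vl.2]) (m - vl.1)
    · simp only [hv, if_false]
      exact ih r1 r2 m

lemma join_foldl_acc (l : List String) : ∀ (s : String),
    l.foldl (· ++ ·) s = s ++ String.join l := by
  induction l with
  | nil => intro s; simp [String.join]
  | cons a tl ih =>
    intro s
    rw [List.foldl_cons, ih (s ++ a)]
    have h2 : String.join (a :: tl) = a ++ String.join tl := by
      show List.foldl (· ++ ·) "" (a :: tl) = _
      rw [List.foldl_cons, ih ("" ++ a), String.empty_append]
    rw [h2, ← String.append_assoc]

lemma join_cons (a : String) (l : List String) :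
    String.join (a :: l) = a ++ String.join l := by
  show List.foldl (· ++ ·) "" (a :: l) = _
  rw [List.foldl_cons, join_foldl_acc l ("" ++ a), String.empty_append]

-- step lemmas: for n ≥ 500 both programs peel a leading ת worth 400
lemma A_step (n : Int) (hn : 500 ≤ n) :
    int_to_gimatriya n = "ת" ++ int_to_gimatriya (n - 400) := by
  have h0 : ¬ n ≤ 0 := by omega
  have h0' : ¬ n - 400 ≤ 0 := by omega
  have hfd : PySem.Int.floordiv n 100 = n / 100 := PySem.Int.floordiv_eq_ediv_of_pos (by omega)
  have hfd' : PySem.Int.floordiv (n - 400) 100 = (n - 400) / 100 := PySem.Int.floordiv_eq_ediv_of_pos (by omega)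
  have hmd : PySem.Int.mod n 100 = n % 100 := PySem.Int.mod_eq_emod_of_pos (by omega)
  have hmd' : PySem.Int.mod (n - 400) 100 = (n - 400) % 100 := PySem.Int.mod_eq_emod_of_pos (by omega)
  have hdiv : (n - 400) / 100 = n / 100 - 4 := by omega
  have hmodeq : (n - 400) % 100 = n % 100 := by omega
  have hh : 4 < n / 100 := by omega
  simp only [int_to_gimatriya, h0, h0', if_false,
    show n ≠ 15 by omega, show n ≠ 16 by omega,
    show n - 400 ≠ 15 by omega, show n - 400 ≠ 16 by omega,
    hfd, hfd', hmd, hmd', hdiv, hmodeq]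
  rw [aHundLoop_step (n / 100).toNat "" (n / 100) hh (by omega)]
  rw [aHundLoop_acc _ ("" ++ "ת")]
  simp only [String.empty_append, String.append_assoc]
  split_ifs <;> rfl
lemma B_step (n : Int) (hn : 500 ≤ n) :
    int_to_gimatriya_alt n = "ת" ++ int_to_gimatriya_alt (n - 400) := by
  have h0 : ¬ n ≤ 0 := by omega
  have h0' : ¬ n - 400 ≤ 0 := by omega
  simp only [int_to_gimatriya_alt, h0, h0', if_false]
  rw [bHighLoop_step400 n.toNat [] n (by omega) (by omega)]
  rw [bHighLoop_acc _ ([] ++ ["ת"])]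
  simp only [List.nil_append]
  set q := bHighLoop (n - 400).toNat [] (n - 400) with hq
  by_cases h15 : q.2 = 15
  · rw [if_pos h15, if_pos h15, List.append_assoc]
    exact join_cons "ת" (q.1 ++ ["טו"])
  · rw [if_neg h15, if_neg h15]
    by_cases h16 : q.2 = 16
    · rw [if_pos h16, if_pos h16, List.append_assoc]
      exact join_cons "ת" (q.1 ++ ["טז"])
    · rw [if_neg h16, if_neg h16]
      have hacc := bLow_acc bLowTable ["ת"] q.1 q.2
      rw [hacc]
      exact join_cons "ת" (bLowTable.foldl bLowStep (q.1, q.2)).1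

-- the induction putting base and step together
lemma main_aux (k : Nat) : ∀ (n : Int), n ≤ (k : Int) + 499 →
    int_to_gimatriya n = int_to_gimatriya_alt n := by
  induction k with
  | zero =>
    intro n hn
    by_cases h0 : n ≤ 0
    · have h0' : n ≤ 0 := h0
      simp [int_to_gimatriya, int_to_gimatriya_alt, h0']
    · have hm : n = ((n.toNat : Nat) : Int) := by omega
      rw [hm]
      exact base_cases n.toNat (List.mem_range.mpr (by omega))
  | succ k ih =>
    intro n hn
    by_cases hk : n ≤ (k : Int) + 499
    · exact ih n hk
    · have hn500 : 500 ≤ n := by omega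
      rw [A_step n hn500, B_step n hn500, ih (n - 400) (by omega)]

-- ===== VERDICT (by name: the statement is the Claim_ definition above) =====
theorem int_to_gimatriya_spec : Claim_equal_int_to_gimatriya := by
  intro n _
  show int_to_gimatriya n = int_to_gimatriya_alt n
  exact main_aux n.toNat n (by omega)
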